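-- pv_equiv track=rewrite | github.com/AkatQuas/kiddo-plays | python-language/crack-code-cipher/c19_frequency.py | addFrequency
-- ===== SOURCE A (Python) =====
-- def zeroLetterMap():
--     return {'A': 0, 'B': 0, 'C': 0, 'D': 0, 'E': 0, 'F': 0, 'G': 0, 'H': 0, 'I': 0, 'J': 0, 'K': 0, 'L': 0, 'M': 0, 'N': 0, 'O': 0, 'P': 0, 'Q': 0, 'R': 0, 'S': 0, 'T': 0, 'U': 0, 'V': 0, 'W': 0, 'X': 0, 'Y': 0, 'Z': 0}
--
-- def addFrequency(text):
--     text = text.upper()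
--     freq = zeroLetterMap()
--     for c in text:
--         if c.isalpha():
--             freq[c] += 1
--     l = [(k,v) for k, v in freq.items()]
--     l.sort(key=lambda x: x[1], reverse=True)
--     r = [x[0] for x in l]
--     return ''.join(r)
--
--     return freq
-- ===== SOURCE B (Python) =====
-- LETTERS = 'ABCDEFGHIJKLMNOPQRSTUVWXYZ'
--
-- def addFrequency(text):
--     counts = {}
--     for letter in LETTERS:
--         counts[letter] = 0
--     for c in text.upper():
--         if c.isalpha():
--             counts[c] += 1
--     top = 0
--     for n in counts.values():
--         if top < n:
--             top = n
--     out = []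
--     for v in range(top, -1, -1):
--         for letter in LETTERS:
--             if counts[letter] == v:
--                 out.append(letter)
--     return ''.join(out)
-- ===== Notes on version B (the rewrite author's own statement) =====
-- stated objective: alternative
-- what changed: Replaces the comparison sort of the 26 (letter,count) pairs with a counting sort: after the same counting phase, it computes the maximum count and emits, for each count value from the maximum down to 0, the letters of A-Z holding that count, reproducing the stable descending order with A-Z ties without calling sort.
import Mathlib
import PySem

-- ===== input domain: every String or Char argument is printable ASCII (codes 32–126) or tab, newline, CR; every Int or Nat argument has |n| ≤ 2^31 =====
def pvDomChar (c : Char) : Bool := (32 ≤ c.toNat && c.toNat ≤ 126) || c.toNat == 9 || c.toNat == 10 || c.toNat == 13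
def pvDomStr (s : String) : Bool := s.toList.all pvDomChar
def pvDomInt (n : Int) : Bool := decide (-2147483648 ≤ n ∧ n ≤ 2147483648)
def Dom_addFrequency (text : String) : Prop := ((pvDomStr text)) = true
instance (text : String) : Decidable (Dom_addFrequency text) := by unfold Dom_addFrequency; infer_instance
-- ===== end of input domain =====

-- B replaces A's comparison sort of the 26 (letter, count) pairs by a counting sort over the
-- count values (max count down to 0, letters A-Z within each value); same return value on Dom.

-- ===== PORT A =====
def zeroLetterMap : PySem.Dict Char Int :=
  PySem.Dict.ofList [('A',0),('B',0),('C',0),('D',0),('E',0),('F',0),('G',0),('H',0),('I',0),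
    ('J',0),('K',0),('L',0),('M',0),('N',0),('O',0),('P',0),('Q',0),('R',0),('S',0),('T',0),
    ('U',0),('V',0),('W',0),('X',0),('Y',0),('Z',0)]

-- 'freq[c] += 1' is ported as Dict.modify; exact on Dom, where every counted char is a key of the map.
def addFrequency (text : String) : String :=
  let t := (PySem.Str.upper text).toList
  let freq := t.foldl (fun d c => if PySem.Chars.isalpha c then d.modify c 0 (· + 1) else d) zeroLetterMap
  let l := freq.items
  let ls := PySem.List.sorted l (fun x => x.2) true
  let r := ls.map (fun x => x.1)
  PySem.Str.join "" (r.map (fun c => String.ofList [c]))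

-- ===== PORT B =====
def lettersB : List Char :=
  ['A','B','C','D','E','F','G','H','I','J','K','L','M','N','O','P','Q','R','S','T','U','V','W','X','Y','Z']

def addFrequency_alt (text : String) : String :=
  let counts0 := lettersB.foldl (fun d c => d.insert c (0 : Int)) PySem.Dict.empty
  let counts := (PySem.Str.upper text).toList.foldl
    (fun d c => if PySem.Chars.isalpha c then d.modify c 0 (· + 1) else d) counts0
  let top := counts.values.foldl (fun t n => if t < n then n else t) 0
  let out := (PySem.List.pyRange top (-1) (-1)).foldl (fun acc v =>
      lettersB.foldl (fun acc c => if counts.getD c 0 == v then acc ++ [c] else acc) acc) []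
  PySem.Str.join "" (out.map (fun c => String.ofList [c]))

-- ===== PRECONDITION & SPEC =====
def Spec_addFrequency (text : String) (out : String) : Prop := out = addFrequency_alt text
instance (text : String) (out : String) : Decidable (Spec_addFrequency text out) := by unfold Spec_addFrequency; infer_instance

-- ===== CLAIM (what is proved, stated in full; the proofs are below) =====
def Claim_equal_addFrequency : Prop := ∀ (text : String), Dom_addFrequency text → Spec_addFrequency text (addFrequency text)

-- ===== LEMMAS AND PROOFS =====

-- the shared counting phase of both ports
def pvCounts (text : String) : PySem.Dict Char Int :=
  ((PySem.Str.upper text).toList).foldl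
    (fun d c => if PySem.Chars.isalpha c then d.modify c 0 (· + 1) else d) zeroLetterMap

-- insertBy goes to the front when it precedes everything
lemma insertBy_of_forall_before {α : Type} (before : α → α → Bool) (x : α) (ys : List α)
    (h : ∀ y ∈ ys, before x y = true) :
    PySem.List.insertBy before x ys = x :: ys := by
  cases ys with
  | nil => rfl
  | cons y t => simp [PySem.List.insertBy, h y (by simp)]

-- insertBy skips a prefix it does not precede
lemma insertBy_append_skip {α : Type} (before : α → α → Bool) (x : α) (pre rest : List α)
    (h : ∀ y ∈ pre, before x y = false) :
    PySem.List.insertBy before x (pre ++ rest) = pre ++ PySem.List.insertBy before x rest := by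
  induction pre with
  | nil => rfl
  | cons y t ih =>
      simp only [List.cons_append, PySem.List.insertBy, h y (by simp)]
      simp only [Bool.false_eq_true, if_false]
      rw [ih (fun z hz => h z (by simp [hz]))]

-- inserting one element into a bucket decomposition
lemma insertBy_buckets {α : Type} (key : α → Int) (x : α) (l : List α) (vs : List Int)
    (hs : vs.Pairwise (fun a b => b < a)) (hmem : key x ∈ vs) :
    PySem.List.insertBy (fun a b => decide (key b < key a)) x
      (vs.flatMap (fun v => l.filter (fun y => key y == v)))
    = vs.flatMap (fun v => (l ++ [x]).filter (fun y => key y == v)) := by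
  induction vs with
  | nil => simp at hmem
  | cons v vs ih =>
      have hpw := (List.pairwise_cons.mp hs).1
      have hs' := (List.pairwise_cons.mp hs).2
      simp only [List.flatMap_cons]
      by_cases hx : key x = v
      · -- x lands at the end of the v-bucket
        have hskip : ∀ y ∈ l.filter (fun y => key y == v), (fun a b => decide (key b < key a)) x y = false := by
          intro y hy
          have := List.of_mem_filter hy
          simp only [beq_iff_eq] at this
          simp [this, hx]
        rw [insertBy_append_skip _ _ _ _ hskip]
        have hfront : ∀ y ∈ vs.flatMap (fun v => l.filter (fun y => key y == v)),
            (fun a b => decide (key b < key a)) x y = true := by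
          intro y hy
          rcases List.mem_flatMap.mp hy with ⟨w, hw, hyw⟩
          have := List.of_mem_filter hyw
          simp only [beq_iff_eq] at this
          simp [this, hx]
          exact hpw w hw
        rw [insertBy_of_forall_before _ _ _ hfront]
        have htail : vs.flatMap (fun v => (l ++ [x]).filter (fun y => key y == v))
            = vs.flatMap (fun v => l.filter (fun y => key y == v)) := by
          apply List.flatMap_congr
          intro w hw
          simp only [List.filter_append, List.filter_cons, List.filter_nil]
          have : ¬ (key x == w) = true := by
            simp only [beq_iff_eq]
            intro h; exact absurd (hpw w hw) (by omega)
          simp [this]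
        rw [htail]
        simp [List.filter_append, hx]
      · -- x belongs to a later bucket
        have hmem' : key x ∈ vs := by
          rcases List.mem_cons.mp hmem with h | h
          · exact absurd h hx
          · exact h
        have hskip : ∀ y ∈ l.filter (fun y => key y == v), (fun a b => decide (key b < key a)) x y = false := by
          intro y hy
          have hk := List.of_mem_filter hy
          simp only [beq_iff_eq] at hk
          have : key x < v := hpw _ hmem'
          simp [hk]; omega
        rw [insertBy_append_skip _ _ _ _ hskip, ih hs' hmem']
        have : (l ++ [x]).filter (fun y => key y == v) = l.filter (fun y => key y == v) := by
          simp [List.filter_append, hx]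
        rw [this]

-- a stable reverse sort IS the bucket decomposition over any strictly decreasing cover of the keys
lemma sorted_rev_eq_buckets {α : Type} (key : α → Int) (l : List α) (vs : List Int)
    (hs : vs.Pairwise (fun a b => b < a)) (hcov : ∀ y ∈ l, key y ∈ vs) :
    PySem.List.sorted l key true = vs.flatMap (fun v => l.filter (fun y => key y == v)) := by
  induction l using List.reverseRecOn with
  | nil => simp [PySem.List.sorted]
  | append_singleton l x ih =>
      rw [PySem.List.sorted_rev_eq_foldl_insertBy, List.foldl_append]
      simp only [List.foldl_cons, List.foldl_nil]
      rw [← PySem.List.sorted_rev_eq_foldl_insertBy]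
      rw [ih (fun y hy => hcov y (by simp [hy]))]
      exact insertBy_buckets key x l vs hs (hcov x (by simp))

-- a Dom character whose uppercased form is alphabetic uppercases into A-Z
lemma upper_mem_lettersB (c : Char)
    (hd : pvDomChar c = true)
    (ha : PySem.Chars.isalpha (PySem.Chars.upperChar c) = true) :
    PySem.Chars.upperChar c ∈ lettersB := by
  have hc := Char.ofNat_toNat c
  simp only [pvDomChar, Bool.or_eq_true, Bool.and_eq_true, decide_eq_true_eq, beq_iff_eq] at hd
  have h1 : 9 ≤ c.toNat := by omega
  have h2 : c.toNat ≤ 126 := by omega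
  set n := c.toNat with hn
  clear hd hn
  interval_cases n <;> rw [← hc] at ha ⊢ <;> revert ha <;> decide

-- updating a set with elements it already holds leaves it unchanged
lemma set_update_self {α : Type} [BEq α] [LawfulBEq α] (xs : List α) (s : PySem.Set α)
    (h : ∀ x ∈ xs, x ∈ s) : PySem.Set.update s xs = s := by
  induction xs generalizing s with
  | nil => rfl
  | cons x t ih =>
      have hxs : x ∈ s := h x (by simp)
      simp only [PySem.Set.update, List.foldl_cons]
      have hadd : PySem.Set.add s x = s := by
        simp [PySem.Set.add, PySem.Set.contains, hxs]
      rw [hadd]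
      exact ih s (fun y hy => h y (by simp [hy]))

lemma mem_pyRange_countdown (a x : Int) : x ∈ PySem.List.pyRange a (-1) (-1) ↔ 0 ≤ x ∧ x ≤ a := by
  rw [PySem.List.pyRange_neg_one]
  simp only [List.mem_map, List.mem_range]
  constructor
  · rintro ⟨k, hk, rfl⟩; omega
  · intro ⟨h1, h2⟩; exact ⟨(a - x).toNat, by omega, by omega⟩

lemma pairwise_pyRange_countdown (a : Int) :
    (PySem.List.pyRange a (-1) (-1)).Pairwise (fun u v => v < u) := by
  rw [PySem.List.pyRange_neg_one]
  exact List.Pairwise.map _ (fun u v (h : u < v) => by omega) List.pairwise_lt_range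

-- the counting dict: keys, lookups
lemma pvCounts_eq_filter_fold (text : String) :
    pvCounts text = ((PySem.Str.upper text).toList.filter PySem.Chars.isalpha).foldl
      (fun d c => d.modify c 0 (· + 1)) zeroLetterMap := by
  unfold pvCounts
  rw [PySem.List.foldl_if_eq_foldl_filter]

lemma filtered_mem_lettersB (text : String) (hdom : Dom_addFrequency text) :
    ∀ c ∈ (PySem.Str.upper text).toList.filter PySem.Chars.isalpha, c ∈ lettersB := by
  intro c hc
  have hmem := List.mem_of_mem_filter hc
  have ha := List.of_mem_filter hc
  rw [PySem.Str.toList_upper] at hmem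
  rcases List.mem_map.mp hmem with ⟨c0, hc0, rfl⟩
  have hd : pvDomChar c0 = true := by
    have := (List.all_eq_true.mp hdom) c0 hc0
    exact this
  exact upper_mem_lettersB c0 hd ha

lemma pvCounts_keys (text : String) (hdom : Dom_addFrequency text) :
    (pvCounts text).keys = lettersB := by
  rw [pvCounts_eq_filter_fold]
  rw [PySem.Dict.keys_foldl_modify _ _ (fun _ _ => (· + 1))]
  have hzk : zeroLetterMap.keys = lettersB := by decide
  rw [hzk]
  exact set_update_self _ _ (filtered_mem_lettersB text hdom)

lemma pvCounts_getD (text : String) (c : Char) (hc : c ∈ lettersB) :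
    (pvCounts text).getD c 0 =
      (((PySem.Str.upper text).toList.filter PySem.Chars.isalpha).count c : Int) := by
  rw [pvCounts_eq_filter_fold, PySem.Dict.getD_foldl_modify_add_one]
  have hz : zeroLetterMap.getD c 0 = 0 := by
    fin_cases hc <;> rfl
  rw [hz]; ring

-- ===== VERDICT (by name: the statement is the Claim_ definition above) =====
set_option maxHeartbeats 1000000 in
theorem addFrequency_spec : Claim_equal_addFrequency := by
  intro text hdom
  unfold Spec_addFrequency
  have hinit : lettersB.foldl (fun d c => d.insert c (0 : Int)) PySem.Dict.empty = zeroLetterMap := by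
    decide
  have hA : addFrequency text =
      PySem.Str.join "" (((PySem.List.sorted (pvCounts text).items (fun x => x.2) true).map
        (fun x => x.1)).map (fun c => String.ofList [c])) := rfl
  have hB : addFrequency_alt text =
      PySem.Str.join ""
        (((PySem.List.pyRange
              ((pvCounts text).values.foldl (fun t n => if t < n then n else t) 0) (-1) (-1)).foldl
            (fun acc v =>
              lettersB.foldl
                (fun acc c => if (pvCounts text).getD c 0 == v then acc ++ [c] else acc) acc)
            []).map (fun c => String.ofList [c])) := by
    simp only [addFrequency_alt, hinit]
    rfl
  rw [hA, hB]
  -- notation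
  have hnodup : (pvCounts text).keys.Nodup := by
    rw [pvCounts_keys text hdom]; decide
  have hitems : (pvCounts text).items =
      lettersB.map (fun c => (c, (pvCounts text).getD c 0)) := by
    rw [PySem.Dict.items_eq_map_keys _ hnodup 0, pvCounts_keys text hdom]
  have hvals : (pvCounts text).values = lettersB.map (fun c => (pvCounts text).getD c 0) := by
    rw [PySem.Dict.values_eq_map_keys _ hnodup 0, pvCounts_keys text hdom]
  -- the running maximum is a fold with max
  have hmaxfun : (fun (t n : Int) => if t < n then n else t) = (fun (t n : Int) => max t n) := by
    funext t n
    rcases le_or_gt n t with h | h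
    · rw [if_neg (by omega), max_eq_left h]
    · rw [if_pos h, max_eq_right (by omega)]
  set T : Int := (pvCounts text).values.foldl (fun t n => if t < n then n else t) 0 with hT
  have hTmax : T = (pvCounts text).values.foldl max 0 := by rw [hT, hmaxfun]
  have hT0 : 0 ≤ T := by
    rw [hTmax]; exact (PySem.List.le_foldl_max _ 0).1
  have hTub : ∀ n ∈ (pvCounts text).values, n ≤ T := by
    rw [hTmax]; exact (PySem.List.le_foldl_max _ 0).2
  -- coverage of the bucket values
  have hcov : ∀ y ∈ (pvCounts text).items, (fun x : Char × Int => x.2) y ∈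
      PySem.List.pyRange T (-1) (-1) := by
    intro y hy
    rw [hitems] at hy
    rcases List.mem_map.mp hy with ⟨c, hc, rfl⟩
    rw [mem_pyRange_countdown]
    constructor
    · rw [pvCounts_getD text c hc]; exact Int.natCast_nonneg _
    · apply hTub
      rw [hvals]
      exact List.mem_map.mpr ⟨c, hc, rfl⟩
  -- A's sorted pairs are the buckets
  rw [sorted_rev_eq_buckets _ _ _ (pairwise_pyRange_countdown T) hcov]
  -- B's loops are the buckets
  have hinner : (fun (acc : List Char) (v : Int) =>
      lettersB.foldl (fun acc c => if (pvCounts text).getD c 0 == v then acc ++ [c] else acc) acc)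
      = fun acc v => acc ++ lettersB.filter (fun c => (pvCounts text).getD c 0 == v) := by
    funext acc v
    exact PySem.List.foldl_append_if_eq_filter _ _ _
  rw [hinner, PySem.List.foldl_append_eq_flatMap]
  -- both sides are now flatMaps over the same range; identify the chunks
  rw [hitems]
  apply congrArg
  apply congrArg
  simp only [List.nil_append, List.map_flatMap, List.filter_map, List.map_map, Function.comp_def]
  simp
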